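-- pv_equiv track=rewrite | github.com/gaigenticai/Argus | src/api/routes/easm.py | _normalise_target
-- ===== SOURCE A (Python) =====
-- def _normalise_target(s: str) -> str:
--     """Strip scheme + trailing slash so a target like ``https://x.com/`` and
--     an asset value like ``x.com`` collapse onto each other for fuzzy
--     orphan-target → asset matching."""
--     if not s:
--         return ""
--     s = s.strip().lower()
--     for prefix in ("https://", "http://"):
--         if s.startswith(prefix):
--             s = s[len(prefix):]
--             break
--     s = s.split("/", 1)[0]  # drop path
--     s = s.split(":", 1)[0]  # drop port for matching purposes
--     return s
-- ===== SOURCE B (Python) =====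
-- def _normalise_target(s: str) -> str:
--     """Single left-to-right scan: drop scheme prefix, then collect host
--     characters until the first '/' or ':'."""
--     t = s.strip().lower()
--     if t.startswith("https://"):
--         i = 8
--     elif t.startswith("http://"):
--         i = 7
--     else:
--         i = 0
--     host = []
--     for ch in t[i:]:
--         if ch == "/" or ch == ":":
--             break
--         host.append(ch)
--     return "".join(host)
-- ===== Notes on version B (the rewrite author's own statement) =====
-- stated objective: alternative
-- what changed: Replaces A's split('/',1)/split(':',1) slicing pipeline with a single character scan that collects host characters until the first '/' or ':' after dropping the scheme prefix.
import Mathlib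
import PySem

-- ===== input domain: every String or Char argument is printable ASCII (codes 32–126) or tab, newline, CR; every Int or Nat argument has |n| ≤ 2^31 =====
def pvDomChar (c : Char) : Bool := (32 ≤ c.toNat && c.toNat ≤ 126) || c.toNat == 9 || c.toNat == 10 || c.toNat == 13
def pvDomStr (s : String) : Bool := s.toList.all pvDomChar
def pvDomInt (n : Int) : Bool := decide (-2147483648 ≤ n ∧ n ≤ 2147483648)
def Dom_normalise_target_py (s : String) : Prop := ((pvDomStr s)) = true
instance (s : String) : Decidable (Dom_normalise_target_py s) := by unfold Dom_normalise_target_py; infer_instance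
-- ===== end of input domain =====

-- B replaces the split-based pipeline with a single character scan; alternative decomposition, same cost.
-- ===== PORT A =====
-- A: strip+lower, loop over the two scheme prefixes with break, then split('/',1)[0] and split(':',1)[0].
def normalise_target_py (s : String) : String :=
  if s = "" then ""
  else
    let s1 := PySem.Str.lower (PySem.Str.strip s)
    -- for prefix in ("https://", "http://"): if s.startswith(prefix): s = s[len(prefix):]; break
    let s2 := if PySem.Str.startswith s1 "https://" then PySem.Str.slice s1 (some 8) none
      else if PySem.Str.startswith s1 "http://" then PySem.Str.slice s1 (some 7) none
      else s1
    -- s = s.split("/", 1)[0]  (split with a non-empty separator never returns none/[], so [0] is the head)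
    let s3 := ((PySem.Str.splitMax? s2 "/" 1).getD []).headD s2
    -- s = s.split(":", 1)[0]
    let s4 := ((PySem.Str.splitMax? s3 ":" 1).getD []).headD s3
    s4

-- ===== PORT B =====
-- B: one character scan collecting host characters until the first '/' or ':'.
def bScan : List Char → List Char
  | [] => []
  | ch :: rest => if ch = '/' ∨ ch = ':' then [] else ch :: bScan rest

def normalise_target_py_alt (s : String) : String :=
  let t := PySem.Str.lower (PySem.Str.strip s)
  let i : Int := if PySem.Str.startswith t "https://" then 8
    else if PySem.Str.startswith t "http://" then 7 else 0
  String.ofList (bScan (PySem.Str.slice t (some i) none).toList)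

-- ===== PRECONDITION & SPEC =====
def Spec_normalise_target_py (s : String) (out : String) : Prop := out = normalise_target_py_alt s
instance (s : String) (out : String) : Decidable (Spec_normalise_target_py s out) := by unfold Spec_normalise_target_py; infer_instance

-- ===== CLAIM (what is proved, stated in full; the proofs are below) =====
def Claim_equal_normalise_target_py : Prop := ∀ (s : String), Dom_normalise_target_py s → Spec_normalise_target_py s (normalise_target_py s)

-- ===== LEMMAS AND PROOFS =====

-- splitOnMax.go with maxsplit 0 just closes the current piece.
lemma go_zero (sep : List Char) (fuel : Nat) (l cur : List Char) (acc : List (List Char)) :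
    PySem.Chars.splitOnMax.go sep fuel 0 l cur acc = ((cur.reverse ++ l) :: acc).reverse := by
  cases fuel with
  | zero => rfl
  | succ f => cases l with
    | nil => simp [PySem.Chars.splitOnMax.go]
    | cons c r => simp [PySem.Chars.splitOnMax.go]

-- With maxsplit 1 and a one-character separator, the first piece is takeWhile (· ≠ c).
lemma go_one (c : Char) : ∀ (fuel : Nat) (l cur : List Char) (acc : List (List Char)),
    l.length < fuel →
    ∃ t, PySem.Chars.splitOnMax.go [c] fuel 1 l cur acc =
      acc.reverse ++ (cur.reverse ++ l.takeWhile (fun x => x ≠ c)) :: t := by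
  intro fuel
  induction fuel with
  | zero => intro l cur acc h; omega
  | succ f ih =>
    intro l cur acc h
    cases l with
    | nil => exact ⟨[], by simp [PySem.Chars.splitOnMax.go]⟩
    | cons c' r =>
      by_cases hc : c' = c
      · subst hc
        refine ⟨[r], ?_⟩
        simp [PySem.Chars.splitOnMax.go, List.isPrefixOf, go_zero, List.takeWhile]
      · obtain ⟨t, ht⟩ := ih r (c' :: cur) acc (by simp at h ⊢; omega)
        refine ⟨t, ?_⟩
        have hpref : List.isPrefixOf [c] (c' :: r) = false := by
          simp [List.isPrefixOf]
          exact fun h' => (hc h'.symm).elim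
        simp [PySem.Chars.splitOnMax.go, hpref, ht, List.takeWhile, hc]

lemma split_head (c : Char) (l : List Char) :
    ∃ t, PySem.Chars.splitOnMax l [c] 1 = l.takeWhile (fun x => x ≠ c) :: t := by
  obtain ⟨t, ht⟩ := go_one c (l.length + 1) l [] [] (by omega)
  exact ⟨t, by simpa [PySem.Chars.splitOnMax] using ht⟩

-- The Python-level split(sep,1)[0] step, lifted to strings.
lemma str_split_head (c : Char) (u : String) :
    ((PySem.Str.splitMax? u (String.ofList [c]) 1).getD []).headD u
      = String.ofList (u.toList.takeWhile (fun x => x ≠ c)) := by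
  obtain ⟨t, ht⟩ := split_head c u.toList
  simp [PySem.Str.splitMax?, PySem.Chars.splitMax?, ht]

-- B's scan is the composition of the two takeWhiles.
lemma bScan_eq (l : List Char) :
    bScan l = (l.takeWhile (fun x => x ≠ '/')).takeWhile (fun x => x ≠ ':') := by
  induction l with
  | nil => rfl
  | cons ch r ih =>
    by_cases h1 : ch = '/'
    · subst h1; simp [bScan, List.takeWhile]
    · by_cases h2 : ch = ':'
      · subst h2; simp [bScan, List.takeWhile]
      · simp [bScan, h1, h2, List.takeWhile, ih]

-- ===== VERDICT (by name: the statement is the Claim_ definition above) =====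
theorem normalise_target_py_spec : Claim_equal_normalise_target_py := by
  intro s _
  unfold Spec_normalise_target_py normalise_target_py normalise_target_py_alt
  by_cases hs : s = ""
  · subst hs; decide
  · simp only [hs, if_false]
    set s1 := PySem.Str.lower (PySem.Str.strip s) with hs1
    have h8 : (8 : Int) = ((8 : Nat) : Int) := by norm_num
    have h7 : (7 : Int) = ((7 : Nat) : Int) := by norm_num
    by_cases hA : PySem.Str.startswith s1 "https://" = true
    · simp only [hA, if_true]
      have hslash : "/" = String.ofList ['/'] := rfl
      have hcolon : ":" = String.ofList [':'] := rfl
      rw [hslash, hcolon, str_split_head, str_split_head]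
      simp [bScan_eq]
    · by_cases hB : PySem.Str.startswith s1 "http://" = true
      · simp only [hA, hB, if_true, if_false, Bool.false_eq_true]
        rw [show "/" = String.ofList ['/'] from rfl, show ":" = String.ofList [':'] from rfl,
          str_split_head, str_split_head]
        simp [bScan_eq]
      · simp only [hA, hB, if_false, Bool.false_eq_true]
        rw [show "/" = String.ofList ['/'] from rfl, show ":" = String.ofList [':'] from rfl,
          str_split_head, str_split_head]
        simp [bScan_eq, PySem.Str.slice]
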